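-- pv_equiv track=rewrite | github.com/SimpleMobileResponsiveWebsites/scmv1 | resourceallocationv-1.py | allocate_resources
-- ===== SOURCE A (Python) =====
-- def allocate_resources(demand, available_resources):
--     allocation = {}
--     remaining_demand = demand.copy()
--
--     for resource, available in available_resources.items():
--         if resource in remaining_demand:
--             # Allocate as much as possible based on available resources
--             allocation[resource] = min(remaining_demand[resource], available)
--             remaining_demand[resource] -= allocation[resource]
--
--         # If there's remaining demand, we can't fulfill it
--         if remaining_demand.get(resource, 0) > 0:
--             allocation[resource] = allocation.get(resource, 0) + remaining_demand[resource]
--             remaining_demand[resource] = 0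
--
--     return allocation, remaining_demand
-- ===== SOURCE B (Python) =====
-- def allocate_resources(demand, available_resources):
--     # A's min/subtract then add-back always nets out to the full demand,
--     # so allocation is just demand restricted to available's keys (in
--     # available's order), and remaining demand is zeroed on those keys.
--     allocation = {r: demand[r] for r in available_resources if r in demand}
--     remaining_demand = {r: (0 if r in available_resources else v)
--                         for r, v in demand.items()}
--     return allocation, remaining_demand
-- ===== Notes on version B (the rewrite author's own statement) =====
-- stated objective: simpler
-- what changed: A's per-resource min/subtract plus the add-back branch always cancel to the full demand, so B drops the stateful loop over two mutable dicts and builds the result with two independent comprehensions: allocation = demand restricted to available's keys (in available's order), remaining demand = demand zeroed on those keys.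
import Mathlib
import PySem

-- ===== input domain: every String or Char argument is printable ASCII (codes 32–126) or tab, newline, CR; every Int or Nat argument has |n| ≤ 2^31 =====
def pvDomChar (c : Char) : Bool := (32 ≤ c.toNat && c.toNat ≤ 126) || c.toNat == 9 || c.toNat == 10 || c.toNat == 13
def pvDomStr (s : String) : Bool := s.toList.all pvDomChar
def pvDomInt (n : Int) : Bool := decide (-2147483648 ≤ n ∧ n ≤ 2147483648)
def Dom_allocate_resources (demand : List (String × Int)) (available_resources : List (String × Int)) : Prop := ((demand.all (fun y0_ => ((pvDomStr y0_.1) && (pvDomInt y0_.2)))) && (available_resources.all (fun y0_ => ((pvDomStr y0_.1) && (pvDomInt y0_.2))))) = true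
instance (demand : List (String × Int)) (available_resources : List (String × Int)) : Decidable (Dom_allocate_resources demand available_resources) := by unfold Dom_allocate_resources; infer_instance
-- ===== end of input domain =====

-- B replaces A's stateful min/subtract/add-back loop (whose cap always cancels) by two
-- independent comprehensions; objective: simpler.


-- ===== PORT A =====
-- one iteration of A's 'for resource, available in available_resources.items()' loop
def pvStepA (st : PySem.Dict String Int × PySem.Dict String Int) (p : String × Int) :
    PySem.Dict String Int × PySem.Dict String Int :=
  let allocation := st.1
  let remaining := st.2
  let resource := p.1
  let available := p.2
  let (allocation, remaining) :=
    if remaining.contains resource then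
      -- allocation[resource] = min(remaining_demand[resource], available)
      let a := min (remaining.getD resource 0) available
      -- remaining_demand[resource] -= allocation[resource]
      (allocation.insert resource a,
       remaining.insert resource (remaining.getD resource 0 - a))
    else (allocation, remaining)
  if remaining.getD resource 0 > 0 then
    (allocation.insert resource (allocation.getD resource 0 + remaining.getD resource 0),
     remaining.insert resource 0)
  else (allocation, remaining)

def allocate_resources (demand : List (String × Int)) (available_resources : List (String × Int)) : (List (String × Int)) × (List (String × Int)) :=
  -- allocation = {}; remaining_demand = demand.copy(); for-loop; return both dicts
  let res := available_resources.foldl pvStepA (PySem.Dict.empty, PySem.Dict.mk demand)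
  (res.1.items, res.2.items)

-- ===== PORT B =====
def allocate_resources_alt (demand : List (String × Int)) (available_resources : List (String × Int)) : (List (String × Int)) × (List (String × Int)) :=
  let d : PySem.Dict String Int := PySem.Dict.mk demand
  let avail : PySem.Dict String Int := PySem.Dict.mk available_resources
  -- {r: demand[r] for r in available_resources if r in demand}
  let allocation := available_resources.filterMap
    (fun p => (d.get? p.1).map (fun v => (p.1, v)))
  -- {r: (0 if r in available_resources else v) for r, v in demand.items()}
  let remaining := demand.map (fun p => (p.1, if avail.contains p.1 then 0 else p.2))
  (allocation, remaining)

-- ===== PRECONDITION & SPEC =====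
-- The arguments encode Python dicts, which cannot contain duplicate keys; Pre_ excludes
-- association lists with a repeated key, on which the dict reading is ambiguous (no Python
-- input A returns on is excluded).
def Pre_allocate_resources (demand : List (String × Int)) (available_resources : List (String × Int)) : Prop :=
  (demand.map Prod.fst).Nodup ∧ (available_resources.map Prod.fst).Nodup
instance (demand : List (String × Int)) (available_resources : List (String × Int)) : Decidable (Pre_allocate_resources demand available_resources) := by unfold Pre_allocate_resources; infer_instance

def pvWitness_allocate_resources : (List (String × Int)) × (List (String × Int)) :=
  ([("cpu", 5), ("mem", 2)], [("mem", 1), ("disk", 3)])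

def Spec_allocate_resources (demand : List (String × Int)) (available_resources : List (String × Int)) (out : (List (String × Int)) × (List (String × Int))) : Prop := out = allocate_resources_alt demand available_resources
instance (demand : List (String × Int)) (available_resources : List (String × Int)) (out : (List (String × Int)) × (List (String × Int))) : Decidable (Spec_allocate_resources demand available_resources out) := by unfold Spec_allocate_resources; infer_instance

-- ===== CLAIM (what is proved, stated in full; the proofs are below) =====
def Claim_equal_allocate_resources : Prop := ∀ (demand : List (String × Int)) (available_resources : List (String × Int)), Dom_allocate_resources demand available_resources → Pre_allocate_resources demand available_resources → Spec_allocate_resources demand available_resources (allocate_resources demand available_resources)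

-- ===== LEMMAS AND PROOFS =====

-- lookup through a key-preserving value map
theorem get?_mk_map_val (l : List (String × Int)) (g : String → Int → Int) (r : String) :
    (PySem.Dict.mk (l.map (fun p => (p.1, g p.1 p.2)))).get? r
      = ((PySem.Dict.mk l).get? r).map (g r) := by
  induction l with
  | nil => simp [PySem.Dict.get?]
  | cons q t ih =>
      obtain ⟨k, v⟩ := q
      simp only [List.map_cons, PySem.Dict.get?_mk_cons]
      by_cases h : (k == r) = true
      · have hk : k = r := eq_of_beq h
        subst hk
        simp
      · simp [h, ih]

theorem keys_mk_map_val (l : List (String × Int)) (g : String → Int → Int) :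
    (PySem.Dict.mk (l.map (fun p => (p.1, g p.1 p.2)))).keys = l.map Prod.fst := by
  simp [PySem.Dict.keys_mk, List.map_map, Function.comp]

-- A's loop body, on a key present in remaining demand, sets allocation to the current
-- remaining value and zeroes remaining demand.
theorem stepA_mem (alloc rem : PySem.Dict String Int) (r : String) (a : Int)
    (h : rem.contains r = true) :
    pvStepA (alloc, rem) (r, a)
      = (alloc.insert r (rem.getD r 0), rem.insert r 0) := by
  unfold pvStepA
  simp only [h, if_true]
  by_cases h2 : (rem.insert r (rem.getD r 0 - min (rem.getD r 0) a)).getD r 0 > 0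
  · simp only [h2, if_true]
    rw [PySem.Dict.getD_insert_self] at h2 ⊢
    rw [PySem.Dict.getD_insert_self, PySem.Dict.insert_insert_self, PySem.Dict.insert_insert_self]
    congr 2
    omega
  · simp only [h2, if_false]
    rw [PySem.Dict.getD_insert_self] at h2
    have hmin : min (rem.getD r 0) a = rem.getD r 0 := by omega
    rw [hmin]
    congr 2
    omega

-- A's loop body is a no-op on a key with no remaining demand entry
theorem stepA_notmem (alloc rem : PySem.Dict String Int) (r : String) (a : Int)
    (h : rem.contains r = false) :
    pvStepA (alloc, rem) (r, a) = (alloc, rem) := by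
  unfold pvStepA
  have h0 : rem.getD r 0 = 0 := PySem.Dict.getD_of_not_contains _ _ h
  simp [h, h0]

-- main loop invariant: folding A's step over 'av', starting from allocation 'alloc' and
-- remaining demand = 'dem' masked to 0 on 'done', appends demand's values at av's keys to
-- the allocation and extends the mask by av's keys.
theorem loopA (dem : List (String × Int))
    (av : List (String × Int)) (done : List String)
    (hav : (av.map Prod.fst).Nodup)
    (hdone : ∀ p ∈ av, p.1 ∉ done)
    (alloc : PySem.Dict String Int)
    (halloc : ∀ p ∈ av, alloc.contains p.1 = false) :
    av.foldl pvStepA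
      (alloc, PySem.Dict.mk (dem.map (fun p => (p.1, if p.1 ∈ done then 0 else p.2))))
      = (PySem.Dict.mk (alloc.items ++ av.filterMap
           (fun p => ((PySem.Dict.mk dem).get? p.1).map (fun v => (p.1, v)))),
         PySem.Dict.mk (dem.map
           (fun p => (p.1, if p.1 ∈ done ∨ p.1 ∈ av.map Prod.fst then 0 else p.2)))) := by
  induction av generalizing done alloc with
  | nil => simp
  | cons q t ih =>
      obtain ⟨r, a⟩ := q
      have hrt : ∀ p ∈ t, p.1 ≠ r := by
        intro p hp hpr
        have hmem : r ∈ t.map Prod.fst := hpr ▸ List.mem_map_of_mem hp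
        simp only [List.map_cons, List.nodup_cons] at hav
        exact hav.1 hmem
      have hav' : (t.map Prod.fst).Nodup := by
        simp only [List.map_cons, List.nodup_cons] at hav
        exact hav.2
      have hdone' : ∀ p ∈ t, p.1 ∉ (r :: done) := by
        intro p hp
        simp only [List.mem_cons, not_or]
        exact ⟨hrt p hp, hdone p (List.mem_cons_of_mem _ hp)⟩
      set rem := PySem.Dict.mk (dem.map (fun p => (p.1, if p.1 ∈ done then 0 else p.2))) with hrem
      have hkeys : rem.keys = dem.map Prod.fst := by
        rw [hrem]; exact keys_mk_map_val dem (fun k v => if k ∈ done then 0 else v)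
      have hcontains : rem.contains r = decide (r ∈ dem.map Prod.fst) := by
        rw [PySem.Dict.contains_eq_decide_mem_keys, hkeys]
      simp only [List.foldl_cons]
      by_cases hr : r ∈ dem.map Prod.fst
      · -- r is a demanded resource
        have hc : rem.contains r = true := by simp [hcontains, hr]
        rw [stepA_mem _ _ _ _ hc]
        have hget : rem.get? r = ((PySem.Dict.mk dem).get? r).map
            (fun v => if r ∈ done then 0 else v) := by
          rw [hrem]; exact get?_mk_map_val dem (fun k v => if k ∈ done then 0 else v) r
        obtain ⟨v, hv⟩ : ∃ v, (PySem.Dict.mk dem).get? r = some v := by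
          rcases h' : (PySem.Dict.mk dem).get? r with _ | v
          · have hnk : r ∉ (PySem.Dict.mk dem).keys := by
              rw [← PySem.Dict.get?_eq_none_iff_not_mem_keys]; exact h'
            exact absurd (by simpa [PySem.Dict.keys_mk] using hnk) (not_not_intro hr)
          · exact ⟨v, rfl⟩
        have hrdone : r ∉ done := hdone (r, a) (by simp)
        have hgetD : rem.getD r 0 = v := by
          rw [PySem.Dict.getD_eq_get?_getD, hget, hv]
          simp [hrdone]
        have hremins : rem.insert r 0
            = PySem.Dict.mk (dem.map (fun p => (p.1, if p.1 ∈ (r :: done) then 0 else p.2))) := by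
          apply PySem.Dict.ext
          rw [PySem.Dict.items_insert_of_contains _ _ hc, hrem]
          show (PySem.Dict.mk _).items.map _ = (PySem.Dict.mk _).items
          rw [List.map_map]
          apply List.map_congr_left
          intro p _
          by_cases hpr : p.1 = r
          · simp [Function.comp, hpr]
          · simp [Function.comp, hpr]
        rw [hgetD, hremins]
        rw [ih (r :: done) hav' hdone' (alloc.insert r v)
              (by
                intro p hp
                rw [PySem.Dict.contains_insert]
                simp [halloc p (List.mem_cons_of_mem _ hp), hrt p hp])]
        refine Prod.ext ?_ ?_
        · apply PySem.Dict.ext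
          rw [PySem.Dict.items_insert_of_not_contains _ _ (halloc (r, a) (by simp))]
          simp [hv, List.append_assoc]
        · apply PySem.Dict.ext
          apply List.map_congr_left
          intro p _
          obtain ⟨x, w⟩ := p
          by_cases hpr : x = r
          · simp [hpr, List.mem_cons]
          · simp only [List.map_cons, List.mem_cons, hpr, false_or]
      · -- r is not demanded: the iteration is a no-op
        have hc : rem.contains r = false := by simp [hcontains, hr]
        rw [stepA_notmem _ _ _ _ hc]
        have hremmask : rem = PySem.Dict.mk (dem.map (fun p => (p.1, if p.1 ∈ (r :: done) then 0 else p.2))) := by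
          rw [hrem]
          congr 1
          apply List.map_congr_left
          intro p hp
          have hpr : p.1 ≠ r := by
            intro hpr
            exact hr (hpr ▸ List.mem_map_of_mem hp)
          simp [List.mem_cons, hpr]
        rw [hremmask, ih (r :: done) hav' hdone' alloc
              (fun p hp => halloc p (List.mem_cons_of_mem _ hp))]
        have hnone : (PySem.Dict.mk dem).get? r = none := by
          rw [PySem.Dict.get?_eq_none_iff_not_mem_keys]
          simpa [PySem.Dict.keys_mk] using hr
        refine Prod.ext ?_ ?_
        · simp [hnone]
        · apply PySem.Dict.ext
          apply List.map_congr_left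
          intro p hp
          by_cases hpr : p.1 = r
          · exact absurd (hpr ▸ List.mem_map_of_mem hp) hr
          · obtain ⟨x, w⟩ := p
            simp only at hpr
            simp only [List.map_cons, List.mem_cons, hpr, false_or]

-- ===== VERDICT (by name: the statement is the Claim_ definition above) =====
theorem allocate_resources_spec : Claim_equal_allocate_resources := by
  intro demand available _hdom hpre
  obtain ⟨_hd, hav⟩ := hpre
  show allocate_resources demand available = allocate_resources_alt demand available
  have hA : allocate_resources demand available
      = ((available.foldl pvStepA (PySem.Dict.empty, PySem.Dict.mk demand)).1.items,
         (available.foldl pvStepA (PySem.Dict.empty, PySem.Dict.mk demand)).2.items) := rfl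
  have hB : allocate_resources_alt demand available
      = (available.filterMap
           (fun p => ((PySem.Dict.mk demand).get? p.1).map (fun v => (p.1, v))),
         demand.map (fun p => (p.1, if (PySem.Dict.mk available).contains p.1 then 0 else p.2))) := rfl
  have hstart : PySem.Dict.mk demand
      = PySem.Dict.mk (demand.map (fun p => (p.1, if p.1 ∈ ([] : List String) then 0 else p.2))) := by
    simp
  rw [hA, hB, hstart,
      loopA demand available [] hav (by simp) PySem.Dict.empty
        (by intro p _; simp [PySem.Dict.contains_empty])]
  refine Prod.ext ?_ ?_
  · simp [PySem.Dict.empty]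
  · apply List.map_congr_left
    intro p _
    have hc : (PySem.Dict.mk available).contains p.1 = decide (p.1 ∈ available.map Prod.fst) := by
      rw [PySem.Dict.contains_eq_decide_mem_keys, PySem.Dict.keys_mk]
    rw [hc]
    simp only [List.not_mem_nil, false_or, decide_eq_true_eq]
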